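-- pv_equiv track=rewrite | github.com/JukaleManmath/Leetcode-Solutions | 3858-minimum-bitwise-or-from-grid/3858-minimum-bitwise-or-from-grid.py | minimumOR
-- ===== SOURCE A (Python) =====
-- from typing import List
--
-- def minimumOR(grid: List[List[int]]) -> int:
--     res = 0
--     rows = len(grid)
--     for bit in range(17, -1, -1):
--         temp = [[] for _ in range(rows)]
--         possible = True
--         for i in range(rows):
--             for num in grid[i]:
--                 if (num & (1 << bit)) == 0:
--                     temp[i].append(num)
--
--             if not temp[i]:
--                 possible= False
--
--         if not possible:
--             res = res | (1 << bit)
--         else: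
--             grid = temp
--     return res
-- ===== SOURCE B (Python) =====
-- from typing import List
--
-- def minimumOR(grid: List[List[int]]) -> int:
--     # Bitset of all feasible targets: a target v (0 <= v < 2**18) is feasible
--     # iff every row contains a number whose (18 low) bits all lie inside v.
--     # Per row: set one bit per number's 18-bit mask, close the bitset upward
--     # under supersets with a subset-sum (zeta) transform, and AND the rows
--     # together.  The answer is the lowest feasible target.
--     BITS = 18
--     SIZE = 1 << BITS
--     # patterns[j]: bit v set (v < SIZE) iff bit j of v is clear
--     patterns = []
--     for j in range(BITS):
--         pat = (1 << (1 << j)) - 1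
--         width = 1 << (j + 1)
--         while width < SIZE:
--             pat |= pat << width
--             width *= 2
--         patterns.append(pat)
--     feasible = (1 << SIZE) - 1
--     for row in grid:
--         rs = 0
--         for num in row:
--             rs |= 1 << (num & (SIZE - 1))
--         for j in range(BITS):
--             rs |= (rs & patterns[j]) << (1 << j)
--         feasible &= rs
--     if feasible == 0:
--         raise ValueError("a row is empty: no number can be chosen from it")
--     # binary-search the lowest set bit of the feasibility bitset
--     bit = 0
--     span = SIZE
--     while span > 1:
--         span //= 2
--         if feasible & ((1 << span) - 1) == 0:
--             feasible >>= span
--             bit += span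
--     return bit
-- ===== Notes on version B (the rewrite author's own statement) =====
-- stated objective: alternative
-- what changed: Replaces A's bit-by-bit greedy with candidate-list filtering by a feasibility-bitset algorithm: one bit per 18-bit target value, per row an upward (superset) closure via a subset-lattice zeta transform on the bitset, an AND across rows, and the lowest set bit of the result as the answer.
-- outside the precondition, e.g. on minimumOR([[]]): A returns 262143, B raises ValueError; on minimumOR([[1, 2], []]): A returns 262143, B raises ValueError
import Mathlib
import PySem

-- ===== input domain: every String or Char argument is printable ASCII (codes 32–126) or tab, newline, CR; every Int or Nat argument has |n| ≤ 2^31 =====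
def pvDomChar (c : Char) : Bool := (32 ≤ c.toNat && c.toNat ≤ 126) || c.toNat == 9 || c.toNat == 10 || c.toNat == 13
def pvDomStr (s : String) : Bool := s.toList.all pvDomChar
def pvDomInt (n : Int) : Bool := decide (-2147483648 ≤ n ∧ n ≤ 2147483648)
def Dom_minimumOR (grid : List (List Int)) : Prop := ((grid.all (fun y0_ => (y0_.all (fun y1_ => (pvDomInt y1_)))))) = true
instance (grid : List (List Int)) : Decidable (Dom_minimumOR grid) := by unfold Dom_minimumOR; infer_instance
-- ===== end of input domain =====

-- B replaces A's greedy bit-by-bit filtering of candidate lists by a feasibility bitset over all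
-- 2^18 target values: per row a subset-lattice zeta transform closes the row's value-set upward,
-- rows are intersected with AND, and the lowest set bit is the answer (objective: alternative).

-- ===== PORT A =====
-- body of A's 'for bit' loop: build temp (filtered rows) and possible, then branch
def pvBitA (st : Int × List (List Int)) (bit : Int) : Int × List (List Int) :=
  let mask : Int := (1 : Int) <<< bit.toNat
  let tp := st.2.foldl (fun (acc : List (List Int) × Bool) row =>
      let ti := row.foldl (fun t num => if PySem.Int.band num mask == 0 then t ++ [num] else t)
        ([] : List Int)
      (acc.1 ++ [ti], acc.2 && !ti.isEmpty)) (([] : List (List Int)), true)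
  if !tp.2 then (PySem.Int.bor st.1 mask, st.2) else (st.1, tp.1)

def minimumOR (grid : List (List Int)) : Int :=
  ((PySem.List.pyRange 17 (-1) (-1)).foldl pvBitA (0, grid)).1

-- ===== PORT B =====
-- Source B's inner 'while width < SIZE' doubling loop (the '0 < width' conjunct only provides termination)
def pvPatLoop (pat width : Nat) : Nat :=
  if h : 0 < width ∧ width < 262144 then pvPatLoop (pat ||| (pat <<< width)) (width * 2) else pat
  termination_by 262144 - width
  decreasing_by omega

-- Source B's 'patterns' list (a grid-independent constant, hoisted to the top level)
def pvPatterns : List Nat := (List.range 18).map (fun j => pvPatLoop ((1 <<< (1 <<< j)) - 1) (1 <<< (j + 1)))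

-- Source B's 'for num in row: rs |= 1 << (num & (SIZE - 1))'
def pvRowBits (row : List Int) : Nat :=
  row.foldl (fun rs num => rs ||| (1 <<< (PySem.Int.band num 262143).toNat)) 0

-- Source B's 'for j in range(BITS): rs |= (rs & patterns[j]) << (1 << j)'
def pvZeta (rs : Nat) : Nat :=
  (List.range 18).foldl (fun rs j => rs ||| ((rs &&& pvPatterns.getD j 0) <<< (1 <<< j))) rs

-- Source B's final 'while span > 1' binary search for the lowest set bit
def pvLowLoop (feasible bit span : Nat) : Nat :=
  if h : 1 < span then
    let span' := span / 2
    if feasible &&& ((1 <<< span') - 1) == 0 then pvLowLoop (feasible >>> span') (bit + span') span'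
    else pvLowLoop feasible bit span'
  else bit
  termination_by span
  decreasing_by all_goals omega

def minimumOR_alt (grid : List (List Int)) : Int :=
  let feasible := grid.foldl (fun feasible row => feasible &&& pvZeta (pvRowBits row)) ((1 <<< 262144) - 1)
  if feasible == 0 then 0  -- Source B raises ValueError here; Pre_minimumOR excludes exactly these inputs
  else ((pvLowLoop feasible 0 262144 : Nat) : Int)

-- ===== PRECONDITION & SPEC =====
-- Pre_ excludes grids containing an empty row: there A returns 262143 (all 18 bits set, though no
-- number can be chosen from an empty row) while B's algorithm finds no feasible target and raises.
def Pre_minimumOR (grid : List (List Int)) : Prop := ∀ r ∈ grid, r ≠ []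
instance (grid : List (List Int)) : Decidable (Pre_minimumOR grid) := by unfold Pre_minimumOR; infer_instance

def pvWitness_minimumOR : List (List Int) := [[3, 5], [6]]

def Spec_minimumOR (grid : List (List Int)) (out : Int) : Prop := out = minimumOR_alt grid
instance (grid : List (List Int)) (out : Int) : Decidable (Spec_minimumOR grid out) := by unfold Spec_minimumOR; infer_instance

-- ===== CLAIM (what is proved, stated in full; the proofs are below) =====
def Claim_equal_minimumOR : Prop := ∀ (grid : List (List Int)), Dom_minimumOR grid → Pre_minimumOR grid → Spec_minimumOR grid (minimumOR grid)

-- ===== LEMMAS AND PROOFS =====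

-- ---------- Nat bit toolbox ----------

lemma pvTestBitAddMul (p q r : Nat) (hr : r < 2 ^ p) (i : Nat) :
    (2 ^ p * q + r).testBit i = if i < p then r.testBit i else q.testBit (i - p) := by
  rcases lt_or_ge i p with h | h
  · rw [if_pos h, Nat.testBit_eq_decide_div_mod_eq, Nat.testBit_eq_decide_div_mod_eq]
    have h1 : 2 ^ p * q + r = 2 ^ i * (2 ^ (p - i) * q) + r := by
      rw [← mul_assoc, ← pow_add]; congr 3; omega
    rw [h1, Nat.mul_add_div (Nat.pow_pos (by omega : (0:Nat) < 2))]
    have h2 : 2 ^ (p - i) * q = 2 * (2 ^ (p - i - 1) * q) := by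
      rw [← mul_assoc]; congr 1
      rw [← pow_succ']; congr 1; omega
    rw [decide_eq_decide]
    omega
  · rw [if_neg (by omega), Nat.testBit_eq_decide_div_mod_eq, Nat.testBit_eq_decide_div_mod_eq]
    have h1 : (2 ^ p * q + r) / 2 ^ i = q / 2 ^ (i - p) := by
      have h2 : (2 : Nat) ^ i = 2 ^ p * 2 ^ (i - p) := by rw [← pow_add]; congr 1; omega
      rw [h2, ← Nat.div_div_eq_div_mul, Nat.mul_add_div (Nat.pow_pos (by omega : (0:Nat) < 2)),
        Nat.div_eq_of_lt hr, Nat.add_zero]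
    rw [h1]

lemma pvAndZeroIff (x y : Nat) : x &&& y = 0 ↔ ∀ i, x.testBit i = true → y.testBit i = false := by
  constructor
  · intro h i hx
    have := congrArg (Nat.testBit · i) h
    simp [Nat.testBit_and, Nat.zero_testBit, hx] at this
    exact this
  · intro h
    apply Nat.eq_of_testBit_eq
    intro i
    simp only [Nat.testBit_and, Nat.zero_testBit]
    by_cases hx : x.testBit i = true
    · simp [hx, h i hx]
    · simp [Bool.not_eq_true] at hx
      simp [hx]

lemma pvSetBit (k x : Nat) (h : x.testBit k = false) : x + 2 ^ k = x ||| 2 ^ k := by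
  obtain ⟨q, r, hx, hr⟩ : ∃ q r, x = 2 ^ (k + 1) * q + r ∧ r < 2 ^ (k + 1) :=
    ⟨x / 2 ^ (k + 1), x % 2 ^ (k + 1), by rw [Nat.div_add_mod], Nat.mod_lt _ (by positivity)⟩
  have hrk : r.testBit k = false := by
    have := pvTestBitAddMul (k + 1) q r hr k
    rw [if_pos (by omega)] at this
    rw [← this, ← hx]; exact h
  have hrlt : r < 2 ^ k := by
    apply Nat.lt_pow_two_of_testBit
    intro i hi
    rcases eq_or_lt_of_le hi with rfl | hi'
    · exact hrk
    · exact Nat.testBit_lt_two_pow (lt_of_lt_of_le hr (Nat.pow_le_pow_right (by omega) (by omega)))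
  apply Nat.eq_of_testBit_eq
  intro i
  have e1 : x + 2 ^ k = 2 ^ (k + 1) * q + (2 ^ k * 1 + r) := by
    rw [hx]; ring
  have hb1 : (2 ^ k * 1 + r) < 2 ^ (k + 1) := by
    have : (2 : Nat) ^ (k + 1) = 2 * 2 ^ k := by rw [pow_succ]; ring
    omega
  rw [e1, pvTestBitAddMul _ _ _ hb1, Nat.testBit_or, hx,
    pvTestBitAddMul _ _ _ hr, Nat.testBit_two_pow]
  rcases lt_trichotomy i k with h1 | rfl | h1
  · rw [if_pos (by omega), if_pos (by omega), pvTestBitAddMul _ _ _ hrlt, if_pos h1]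
    simp [show ¬ (k = i) by omega]
  · rw [if_pos (by omega), if_pos (by omega), pvTestBitAddMul _ _ _ hrlt, if_neg (by omega)]
    simp [Nat.testBit_zero, hrk]
  · by_cases h2 : i < k + 1
    · omega
    · rw [if_neg h2, if_neg h2]
      simp [show ¬ (k = i) by omega]

lemma pvAddOr (y x : Nat) (h : x &&& y = 0) : x + y = x ||| y := by
  induction y using Nat.strong_induction_on generalizing x with
  | _ y ih =>
    rcases Nat.eq_zero_or_pos y with rfl | hy
    · simp
    set k := y.log2 with hk
    have h1 : 2 ^ k ≤ y := Nat.log2_self_le (by omega)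
    have h2 : y < 2 ^ (k + 1) := Nat.lt_log2_self
    have hbk : y.testBit k = true := by
      rw [Nat.testBit_eq_decide_div_mod_eq]
      have h3 : (2 : Nat) ^ (k + 1) = 2 * 2 ^ k := by rw [pow_succ]; ring
      have h4 : y / 2 ^ k = 1 := Nat.div_eq_of_lt_le (by omega) (by omega)
      simp [h4]
    set y' := y - 2 ^ k with hy'
    have hy'lt : y' < 2 ^ k := by
      have h3 : (2 : Nat) ^ (k + 1) = 2 * 2 ^ k := by rw [pow_succ]; ring
      omega
    have hy'bits : ∀ i, i < k → y'.testBit i = y.testBit i := by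
      intro i hi
      have := pvTestBitAddMul k 1 y' hy'lt i
      rw [if_pos hi] at this
      have he : 2 ^ k * 1 + y' = y := by omega
      rw [he] at this
      exact this.symm
    have hxy' : x &&& y' = 0 := by
      rw [pvAndZeroIff] at h ⊢
      intro i hx
      by_cases hik : i < k
      · rw [hy'bits i hik]; exact h i hx
      · exact Nat.testBit_lt_two_pow (lt_of_lt_of_le hy'lt (Nat.pow_le_pow_right (by omega) (by omega)))
    have hxk : x.testBit k = false := by
      rw [pvAndZeroIff] at h
      by_cases hx : x.testBit k = true
      · have := h k hx; rw [this] at hbk; exact absurd hbk (by simp)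
      · simpa using hx
    have hork : (x ||| y').testBit k = false := by
      rw [Nat.testBit_or, hxk]
      simp [Nat.testBit_lt_two_pow hy'lt]
    have hy'k : y'.testBit k = false := Nat.testBit_lt_two_pow hy'lt
    calc x + y = (x + y') + 2 ^ k := by omega
      _ = (x ||| y') + 2 ^ k := by rw [ih y' (by omega) x hxy']
      _ = (x ||| y') ||| 2 ^ k := pvSetBit k _ hork
      _ = x ||| (y' ||| 2 ^ k) := Nat.lor_assoc x y' (2 ^ k)
      _ = x ||| y := by rw [← pvSetBit k y' hy'k]; congr 1; omega

lemma pvComplSub (p x : Nat) (hx : x < 2 ^ p) : 2 ^ p - 1 - x = (2 ^ p - 1) ^^^ x := by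
  set y := (2 ^ p - 1) ^^^ x with hy
  have hyb : ∀ i, y.testBit i = (decide (i < p) ^^ x.testBit i) := by
    intro i; rw [hy, Nat.testBit_xor, Nat.testBit_two_pow_sub_one]
  have hd : x &&& y = 0 := by
    rw [pvAndZeroIff]
    intro i hx'
    have hip : i < p := by
      by_contra h'
      have := Nat.ge_two_pow_of_testBit hx'
      have := Nat.pow_le_pow_right (show 1 ≤ 2 by omega) (show p ≤ i by omega)
      omega
    rw [hyb, hx']
    simp [hip]
  have hxy : x + y = 2 ^ p - 1 := by
    rw [pvAddOr y x hd]
    apply Nat.eq_of_testBit_eq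
    intro i
    rw [Nat.testBit_or, hyb, Nat.testBit_two_pow_sub_one]
    by_cases hip : i < p
    · simp [hip]
    · have hxb : x.testBit i = false :=
        Nat.testBit_lt_two_pow (lt_of_lt_of_le hx (Nat.pow_le_pow_right (by omega) (by omega)))
      simp [hip, hxb]
  omega

lemma pvComplBit (p x b : Nat) (hx : x < 2 ^ p) (hb : b < p) :
    (2 ^ p - 1 - x).testBit b = ! x.testBit b := by
  rw [pvComplSub p x hx, Nat.testBit_xor, Nat.testBit_two_pow_sub_one]
  simp [hb]

lemma pvClearBit (k v : Nat) (h : v.testBit k = true) : v ^^^ 2 ^ k = v - 2 ^ k := by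
  set x := v ^^^ 2 ^ k with hx
  have hxk : x.testBit k = false := by
    rw [hx, Nat.testBit_xor, h, Nat.testBit_two_pow]
    simp
  have hor : x ||| 2 ^ k = v := by
    apply Nat.eq_of_testBit_eq
    intro i
    rw [Nat.testBit_or, hx, Nat.testBit_xor, Nat.testBit_two_pow]
    by_cases hik : k = i
    · subst hik; simp [h]
    · simp [hik]
  have := pvSetBit k x hxk
  rw [hor] at this
  have h2 : 2 ^ k ≤ v := Nat.ge_two_pow_of_testBit h
  omega

-- ---------- Python bitwise-and bridges ----------

-- the 18-bit mask num & 262143 that B computes; A's per-bit test reads exactly its bits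
def pvMask (num : Int) : Nat := (PySem.Int.band num 262143).toNat

lemma pvAndPowZeroIff (x b : Nat) : x &&& 2 ^ b = 0 ↔ x.testBit b = false := by
  rw [pvAndZeroIff]
  constructor
  · intro h
    by_cases hx : x.testBit b = true
    · have := h b hx
      rw [Nat.testBit_two_pow] at this
      simp at this
    · simpa using hx
  · intro h i hi
    rw [Nat.testBit_two_pow]
    by_cases hbi : b = i
    · subst hbi; rw [hi] at h; simp at h
    · simp [hbi]

lemma pvPowAnd (b k : Nat) : 2 ^ b &&& k = if k.testBit b then 2 ^ b else 0 := by
  apply Nat.eq_of_testBit_eq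
  intro i
  rw [Nat.testBit_and, Nat.testBit_two_pow]
  by_cases h : k.testBit b
  · rw [if_pos h, Nat.testBit_two_pow]
    by_cases hbi : b = i
    · subst hbi; simp [h]
    · simp [hbi]
  · rw [if_neg h, Nat.zero_testBit]
    by_cases hbi : b = i
    · subst hbi; simp [h]
    · simp [hbi]

lemma pvLowAnd (k : Nat) : 262143 &&& k = k % 262144 := by
  apply Nat.eq_of_testBit_eq
  intro i
  have h18 : (262143 : Nat) = 2 ^ 18 - 1 := by norm_num
  have h18' : (262144 : Nat) = 2 ^ 18 := by norm_num
  rw [Nat.testBit_and, h18, h18', Nat.testBit_two_pow_sub_one, Nat.testBit_mod_two_pow,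
    Bool.and_comm]

lemma pvMaskLt (num : Int) : pvMask num < 262144 := by
  unfold pvMask PySem.Int.band
  by_cases h : 0 ≤ num
  · rw [if_pos h, if_pos (by norm_num)]
    simp only [Int.toNat_natCast, show (262143 : Int).toNat = 262143 from rfl]
    have : num.toNat &&& 262143 ≤ 262143 := Nat.and_le_right
    omega
  · rw [if_neg h, if_pos (by norm_num)]
    simp only [Int.toNat_natCast, show (262143 : Int).toNat = 262143 from rfl]
    omega

lemma pvMaskBit (num : Int) (b : Nat) (hb : b < 18) :
    (PySem.Int.band num ((1 : Int) <<< b) == 0) = ! (pvMask num).testBit b := by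
  have hpow : (1 : Int) <<< b = ((2 ^ b : Nat) : Int) := by
    rw [Int.shiftLeft_eq]; push_cast; ring
  have h18 : (262143 : Nat) = 2 ^ 18 - 1 := by norm_num
  unfold pvMask PySem.Int.band
  by_cases h : 0 ≤ num
  · rw [hpow, if_pos h, if_pos h, if_pos (by positivity), if_pos (by norm_num)]
    simp only [Int.toNat_natCast, show (262143 : Int).toNat = 262143 from rfl]
    have hand : (num.toNat &&& 2 ^ b = 0) ↔ num.toNat.testBit b = false := pvAndPowZeroIff _ b
    have hmb : (num.toNat &&& 262143).testBit b = num.toNat.testBit b := by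
      rw [Nat.testBit_and, h18, Nat.testBit_two_pow_sub_one]
      simp [hb]
    rw [hmb]
    by_cases hx : num.toNat.testBit b = true
    · have : ¬ (num.toNat &&& 2 ^ b = 0) := by rw [hand]; simp [hx]
      simp [hx]
      omega
    · rw [Bool.not_eq_true] at hx
      have : num.toNat &&& 2 ^ b = 0 := by rw [hand]; exact hx
      simp [hx, this]
  · rw [hpow, if_neg h, if_neg h, if_pos (by positivity), if_pos (by norm_num)]
    simp only [Int.toNat_natCast, show (262143 : Int).toNat = 262143 from rfl]
    set k := (-num - 1).toNat with hk
    rw [pvPowAnd b k, pvLowAnd k]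
    have hmod : (262143 - k % 262144).testBit b = ! (k % 262144).testBit b := by
      have := pvComplBit 18 (k % 262144) b
        (by have h262 := Nat.mod_lt k (show 0 < 262144 by norm_num); omega) hb
      rw [h18]
      exact this
    have hmodbit : (k % 262144).testBit b = k.testBit b := by
      have h18' : (262144 : Nat) = 2 ^ 18 := by norm_num
      rw [h18', Nat.testBit_mod_two_pow]
      simp [hb]
    rw [hmod, hmodbit]
    by_cases hx : k.testBit b = true
    · simp [hx]
    · rw [Bool.not_eq_true] at hx
      simp [hx]

-- ---------- the greedy recursion behind A ----------

def pvMrows (g : List (List Int)) : List (List Nat) := g.map (List.map pvMask)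

def pvG : Nat → List (List Nat) → Nat
  | 0, _ => 0
  | n + 1, rows =>
      if rows.all (fun r => r.any (fun m => ! m.testBit n)) then
        pvG n (rows.map (fun r => r.filter (fun m => ! m.testBit n)))
      else 2 ^ n + pvG n rows

lemma pvG_lt (n : Nat) (rows : List (List Nat)) : pvG n rows < 2 ^ n := by
  induction n generalizing rows with
  | zero => simp [pvG]
  | succ n ih =>
    rw [pvG]
    have h2 : (2:Nat) ^ (n+1) = 2 * 2 ^ n := by rw [pow_succ]; ring
    split
    · have := ih (rows.map (fun r => r.filter (fun m => ! m.testBit n)))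
      omega
    · have := ih rows
      omega

lemma pvFilterNotEmpty (p : Int → Bool) (l : List Int) :
    (!(l.filter p).isEmpty) = l.any p := by
  induction l with
  | nil => simp
  | cons x xs ih => by_cases h : p x <;> simp [h, ih]

lemma pvRowsFold (f : List Int → List Int) (g : List (List Int)) (l : List (List Int)) (p : Bool) :
    g.foldl (fun (acc : List (List Int) × Bool) row => (acc.1 ++ [f row], acc.2 && !(f row).isEmpty)) (l, p)
      = (l ++ g.map f, p && g.all (fun r => !(f r).isEmpty)) := by
  induction g generalizing l p with
  | nil => simp
  | cons r rs ih => simp [List.foldl_cons, ih, Bool.and_assoc]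

lemma pvInnerFold (mask : Int) (row : List Int) :
    row.foldl (fun t num => if PySem.Int.band num mask == 0 then t ++ [num] else t) ([] : List Int)
      = row.filter (fun num => PySem.Int.band num mask == 0) := by
  simpa using PySem.List.foldl_append_if_eq_filter (fun num => PySem.Int.band num mask == 0) row []

lemma pvShlOne (k : Nat) : (1 : Int) <<< k = ((1 <<< k : Nat) : Int) := by
  simp [Int.shiftLeft_eq, Nat.shiftLeft_eq]

lemma pvPyRangeBits : PySem.List.pyRange 17 (-1) (-1) = ((List.range 18).reverse.map (fun k => (k : Int))) := by
  decide

lemma pvAfold (n : Nat) (hn : n ≤ 18) (F : List (List Int)) (resN : Nat) :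
    (((List.range n).reverse.map (fun k => (k : Int))).foldl pvBitA ((resN : Int), F)).1
      = ((resN ||| pvG n (pvMrows F) : Nat) : Int) := by
  induction n generalizing F resN with
  | zero => simp [pvG]
  | succ n ih =>
    have hn' : n < 18 := by omega
    have hrev : (List.range (n+1)).reverse = n :: (List.range n).reverse := by
      rw [List.range_succ, List.reverse_append]; rfl
    rw [show ((List.range (n+1)).reverse.map (fun k => (k : Int)))
        = (n : Int) :: ((List.range n).reverse.map (fun k => (k : Int))) by rw [hrev]; rfl]
    rw [List.foldl_cons]
    have hstep : pvBitA ((resN : Int), F) ((n : Int)) =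
        if F.all (fun r => r.any (fun num => ! (pvMask num).testBit n)) then
          ((resN : Int), F.map (fun r => r.filter (fun num => ! (pvMask num).testBit n)))
        else (((resN ||| 2 ^ n : Nat) : Int), F) := by
      unfold pvBitA
      simp only [pvInnerFold]
      simp only [pvRowsFold]
      simp only [List.nil_append, Bool.true_and, pvFilterNotEmpty]
      simp only [Int.toNat_natCast]
      simp only [pvMaskBit _ n hn']
      by_cases hc : F.all (fun r => r.any (fun num => ! (pvMask num).testBit n)) = true
      · simp [hc]
      · rw [Bool.not_eq_true] at hc
        simp only [hc, Bool.not_false, if_true, if_false]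
        congr 1
        rw [pvShlOne, PySem.Int.bor_natCast]
        congr 2
        rw [Nat.shiftLeft_eq, one_mul]
    rw [hstep]
    have hcond : (pvMrows F).all (fun r => r.any (fun m => ! m.testBit n))
        = F.all (fun r => r.any (fun num => ! (pvMask num).testBit n)) := by
      unfold pvMrows
      simp [List.all_map, List.any_map, Function.comp_def]
    by_cases hc : F.all (fun r => r.any (fun num => ! (pvMask num).testBit n)) = true
    · rw [if_pos hc, ih (by omega)]
      have hfil : pvMrows (F.map (fun r => r.filter (fun num => ! (pvMask num).testBit n)))
          = (pvMrows F).map (fun r => r.filter (fun m => ! m.testBit n)) := by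
        unfold pvMrows
        simp only [List.map_map, Function.comp_def]
        congr 1
        funext r
        rw [List.filter_map]
        rfl
      rw [hfil]
      rw [pvG]
      rw [if_pos (by rw [hcond]; exact hc)]
    · rw [Bool.not_eq_true] at hc
      rw [if_neg (by simpa using hc)]
      rw [ih (by omega)]
      rw [pvG, if_neg (by rw [hcond, hc]; simp)]
      congr 1
      have hglt := pvG_lt n (pvMrows F)
      have hbit : (pvG n (pvMrows F)).testBit n = false := Nat.testBit_lt_two_pow hglt
      rw [Nat.lor_assoc]
      congr 1
      rw [Nat.lor_comm, ← pvSetBit n _ hbit]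
      omega

lemma pvA_eq (grid : List (List Int)) : minimumOR grid = ((pvG 18 (pvMrows grid) : Nat) : Int) := by
  unfold minimumOR
  rw [pvPyRangeBits]
  have h := pvAfold 18 le_rfl grid 0
  simpa using h

-- ---------- greedy = least feasible target ----------

def pvSub (x v : Nat) : Prop := ∀ i, x.testBit i = true → v.testBit i = true

def pvFeas (n : Nat) (rows : List (List Nat)) (v : Nat) : Prop :=
  ∀ r ∈ rows, ∃ m ∈ r, pvSub (m % 2 ^ n) v

lemma pvGreedy (n : Nat) (rows : List (List Nat)) (hne : ∀ r ∈ rows, r ≠ []) :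
    pvFeas n rows (pvG n rows) ∧ (∀ v, v < 2 ^ n → pvFeas n rows v → pvG n rows ≤ v) := by
  induction n generalizing rows with
  | zero =>
    refine ⟨?_, fun v _ _ => Nat.zero_le v⟩
    intro r hr
    obtain ⟨m, hm⟩ := List.exists_mem_of_ne_nil _ (hne r hr)
    exact ⟨m, hm, by intro i hi; rw [pow_zero, Nat.mod_one, Nat.zero_testBit] at hi; cases hi⟩
  | succ n ih =>
    have hpow : (2:Nat) ^ (n+1) = 2 * 2 ^ n := by rw [pow_succ]; ring
    rw [pvG]
    by_cases hc : rows.all (fun r => r.any (fun m => ! m.testBit n)) = true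
    · rw [if_pos hc]
      set F := rows.map (fun r => r.filter (fun m => ! m.testBit n)) with hF
      have hFne : ∀ r ∈ F, r ≠ [] := by
        intro r' hr'
        rw [hF, List.mem_map] at hr'
        obtain ⟨r, hr, rfl⟩ := hr'
        rw [List.all_eq_true] at hc
        obtain ⟨m, hm, hmb⟩ := List.any_eq_true.mp (hc r hr)
        exact List.ne_nil_of_mem (List.mem_filter.mpr ⟨hm, hmb⟩)
      obtain ⟨ihF, ihMin⟩ := ih F hFne
      have hGlt := pvG_lt n F
      constructor
      · intro r hr
        obtain ⟨m, hmF, hsub⟩ := ihF (r.filter (fun m => ! m.testBit n)) (List.mem_map_of_mem hr)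
        obtain ⟨hmr, hmb⟩ := List.mem_filter.mp hmF
        refine ⟨m, hmr, ?_⟩
        intro i hi
        rw [Nat.testBit_mod_two_pow] at hi
        have hin : i < n + 1 := by
          rcases Bool.and_eq_true .. |>.mp hi with ⟨h1, _⟩
          exact of_decide_eq_true h1
        rcases Bool.and_eq_true .. |>.mp hi with ⟨_, h2⟩
        have hineq : i ≠ n := by
          rintro rfl
          rw [h2] at hmb; cases hmb
        apply hsub
        rw [Nat.testBit_mod_two_pow, h2]
        simp
        omega
      · intro v hv hfeas
        by_cases hvn : v.testBit n = true
        · have := Nat.ge_two_pow_of_testBit hvn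
          omega
        · rw [Bool.not_eq_true] at hvn
          have hv' : v < 2 ^ n := by
            apply Nat.lt_pow_two_of_testBit
            intro i hi
            rcases eq_or_lt_of_le hi with rfl | hi'
            · exact hvn
            · exact Nat.testBit_lt_two_pow (lt_of_lt_of_le hv (Nat.pow_le_pow_right (by omega) hi'))
          apply ihMin v hv'
          intro r' hr'
          rw [hF, List.mem_map] at hr'
          obtain ⟨r, hr, rfl⟩ := hr'
          obtain ⟨m, hmr, hsub⟩ := hfeas r hr
          have hmn : m.testBit n = false := by
            by_contra hmn'
            rw [Bool.not_eq_false] at hmn'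
            have : v.testBit n = true := by
              apply hsub
              rw [Nat.testBit_mod_two_pow, hmn']
              simp
            rw [this] at hvn; cases hvn
          refine ⟨m, List.mem_filter.mpr ⟨hmr, by rw [hmn]; rfl⟩, ?_⟩
          intro i hi
          rw [Nat.testBit_mod_two_pow] at hi
          rcases Bool.and_eq_true .. |>.mp hi with ⟨h1, h2⟩
          have hin : i < n := of_decide_eq_true h1
          apply hsub
          rw [Nat.testBit_mod_two_pow, h2]
          simp
          omega
    · rw [if_neg hc]
      obtain ⟨ihA, ihMin⟩ := ih rows hne
      have hGlt := pvG_lt n rows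
      have hrow : ∃ r ∈ rows, ∀ m ∈ r, m.testBit n = true := by
        rw [List.all_eq_true] at hc
        push_neg at hc
        obtain ⟨r, hr, hrb⟩ := hc
        refine ⟨r, hr, ?_⟩
        intro m hm
        by_contra hmb
        rw [Bool.not_eq_true] at hmb
        exact hrb (List.any_eq_true.mpr ⟨m, hm, by rw [hmb]; rfl⟩)
      have hbits : ∀ i, (2 ^ n + pvG n rows).testBit i
          = if i = n then true else (pvG n rows).testBit i := by
        intro i
        have hb : (pvG n rows).testBit n = false := Nat.testBit_lt_two_pow hGlt
        rw [add_comm, pvSetBit n _ hb, Nat.testBit_or, Nat.testBit_two_pow]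
        by_cases hin : i = n
        · subst hin; simp
        · simp [hin, Ne.symm hin]
      constructor
      · intro r hr
        obtain ⟨m, hmr, hsub⟩ := ihA r hr
        refine ⟨m, hmr, ?_⟩
        intro i hi
        rw [Nat.testBit_mod_two_pow] at hi
        rcases Bool.and_eq_true .. |>.mp hi with ⟨h1, h2⟩
        have hin : i < n + 1 := of_decide_eq_true h1
        rw [hbits i]
        by_cases hieq : i = n
        · simp [hieq]
        · rw [if_neg hieq]
          apply hsub
          rw [Nat.testBit_mod_two_pow, h2]
          simp
          omega
      · intro v hv hfeas
        obtain ⟨r0, hr0, hall⟩ := hrow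
        obtain ⟨m0, hm0, hsub0⟩ := hfeas r0 hr0
        have hvn : v.testBit n = true := by
          apply hsub0
          rw [Nat.testBit_mod_two_pow, hall m0 hm0]
          simp
        have hv2 : 2 ^ n ≤ v := Nat.ge_two_pow_of_testBit hvn
        have hfeas' : pvFeas n rows (v % 2 ^ n) := by
          intro r hr
          obtain ⟨m, hmr, hsub⟩ := hfeas r hr
          refine ⟨m, hmr, ?_⟩
          intro i hi
          rw [Nat.testBit_mod_two_pow] at hi ⊢
          rcases Bool.and_eq_true .. |>.mp hi with ⟨h1, h2⟩
          have hin : i < n := of_decide_eq_true h1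
          have : v.testBit i = true := by
            apply hsub
            rw [Nat.testBit_mod_two_pow, h2]
            simp
            omega
          rw [this]
          simp
          omega
        have := ihMin (v % 2 ^ n) (Nat.mod_lt _ (by positivity)) hfeas'
        have hmod : v % 2 ^ n = v - 2 ^ n := by
          have hdiv : v / 2 ^ n = 1 := Nat.div_eq_of_lt_le (by omega) (by omega)
          have h2 := Nat.div_add_mod v (2 ^ n)
          rw [hdiv, mul_one] at h2
          omega
        omega

-- ---------- the bitset computed by B ----------

lemma pvRowBitsAux (row : List Int) (acc : Nat) (v : Nat) :
    ((row.foldl (fun rs num => rs ||| (1 <<< (PySem.Int.band num 262143).toNat)) acc).testBit v = true)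
      ↔ (acc.testBit v = true ∨ ∃ num ∈ row, pvMask num = v) := by
  induction row generalizing acc with
  | nil => simp
  | cons x xs ih =>
    rw [List.foldl_cons, ih]
    have hone : (1 : Nat) <<< (PySem.Int.band x 262143).toNat = 2 ^ pvMask x := by
      rw [Nat.shiftLeft_eq, one_mul]; rfl
    rw [hone]
    constructor
    · rintro (h | h)
      · rw [Nat.testBit_or] at h
        rcases Bool.or_eq_true .. |>.mp h with h' | h'
        · exact Or.inl h'
        · rw [Nat.testBit_two_pow] at h'
          exact Or.inr ⟨x, by simp, of_decide_eq_true h'⟩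
      · obtain ⟨num, hnum, hm⟩ := h
        exact Or.inr ⟨num, by simp [hnum], hm⟩
    · rintro (h | ⟨num, hnum, hm⟩)
      · left; rw [Nat.testBit_or, h]; rfl
      · rcases List.mem_cons.mp hnum with rfl | hnum'
        · left
          rw [Nat.testBit_or, hm, Nat.testBit_two_pow]
          simp
        · exact Or.inr ⟨num, hnum', hm⟩

lemma pvRowBitsBit (row : List Int) (v : Nat) :
    ((pvRowBits row).testBit v = true) ↔ ∃ num ∈ row, pvMask num = v := by
  unfold pvRowBits
  rw [pvRowBitsAux]
  simp [Nat.zero_testBit]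

lemma pvPatLoopInv (d : Nat) : ∀ (t : Nat), t + d = 18 → ∀ (j : Nat) (pat : Nat), j < t →
    (∀ v, pat.testBit v = (decide (v < 2 ^ t) && ! v.testBit j)) →
    ∀ v, (pvPatLoop pat (2 ^ t)).testBit v = (decide (v < 262144) && ! v.testBit j) := by
  induction d with
  | zero =>
    intro t ht j pat hj hpat v
    have ht' : t = 18 := by omega
    subst ht'
    rw [pvPatLoop, dif_neg (by norm_num)]
    rw [hpat v]
    norm_num
  | succ d ihd =>
    intro t ht j pat hj hpat v
    have htlt : (2:Nat) ^ t < 262144 := by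
      have : (2:Nat) ^ t < 2 ^ 18 := Nat.pow_lt_pow_right (by omega) (by omega)
      simpa using this
    rw [pvPatLoop, dif_pos ⟨by positivity, htlt⟩]
    have hw : (2:Nat) ^ t * 2 = 2 ^ (t + 1) := by rw [pow_succ]
    rw [hw]
    apply ihd (t + 1) (by omega) j _ (by omega) _ v
    intro w
    rw [Nat.testBit_or, hpat w, Nat.testBit_shiftLeft]
    have hpow : (2:Nat) ^ (t+1) = 2 * 2 ^ t := by rw [pow_succ]; ring
    by_cases h1 : w < 2 ^ t
    · have : ¬ (w ≥ 2 ^ t) := by omega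
      simp only [decide_eq_true_eq] at *
      rw [decide_eq_false this]
      simp [h1, show w < 2 ^ (t+1) by omega]
    · by_cases h2 : w < 2 ^ (t + 1)
      · have hge : w ≥ 2 ^ t := by omega
        have hsub : w - 2 ^ t < 2 ^ t := by omega
        rw [hpat (w - 2 ^ t)]
        have hbit : (w - 2 ^ t).testBit j = w.testBit j := by
          have he : 2 ^ t * 1 + (w - 2 ^ t) = w := by omega
          have := pvTestBitAddMul t 1 (w - 2 ^ t) hsub j
          rw [he, if_pos (by omega)] at this
          exact this.symm
        rw [hbit]
        rw [decide_eq_false (show ¬ (w < 2 ^ t) from h1), decide_eq_true hge,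
          decide_eq_true hsub, decide_eq_true h2]
        simp
      · have hb1 : w ≥ 2 ^ t := by omega
        have hb2 : ¬ (w - 2 ^ t < 2 ^ t) := by omega
        rw [hpat (w - 2 ^ t)]
        rw [decide_eq_false h1, decide_eq_false h2, decide_eq_false hb2, decide_eq_true hb1]
        simp
lemma pvPatternsGet (j : Nat) (hj : j < 18) (v : Nat) :
    (pvPatterns.getD j 0).testBit v = (decide (v < 262144) && ! v.testBit j) := by
  have hget : pvPatterns.getD j 0 = pvPatLoop (2 ^ 2 ^ j - 1) (2 ^ (j + 1)) := by
    unfold pvPatterns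
    rw [List.getD_eq_getElem?_getD, List.getElem?_map, List.getElem?_range hj]
    simp [Nat.shiftLeft_eq]
  rw [hget]
  apply pvPatLoopInv (18 - (j + 1)) (j + 1) (by omega) j _ (by omega)
  intro w
  rw [Nat.testBit_two_pow_sub_one]
  by_cases h1 : w < 2 ^ j
  · have hwj : w.testBit j = false := Nat.testBit_lt_two_pow h1
    have : w < 2 ^ (j + 1) := lt_of_lt_of_le h1 (Nat.pow_le_pow_right (by omega) (by omega))
    simp [h1, this, hwj]
  · by_cases h2 : w < 2 ^ (j + 1)
    · have hpow : (2:Nat) ^ (j+1) = 2 * 2 ^ j := by rw [pow_succ]; ring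
      have hwj : w.testBit j = true := by
        rw [Nat.testBit_eq_decide_div_mod_eq]
        have : w / 2 ^ j = 1 := Nat.div_eq_of_lt_le (by omega) (by omega)
        simp [this]
      simp [h1, h2, hwj]
    · simp [h1, h2]
lemma pvZetaAux (k : Nat) : k ≤ 18 → ∀ (rs0 : Nat), ∀ v, v < 262144 →
    ((((List.range k).foldl (fun rs j => rs ||| ((rs &&& pvPatterns.getD j 0) <<< (1 <<< j))) rs0).testBit v = true)
      ↔ ∃ u, rs0.testBit u = true ∧ pvSub u v ∧ (∀ i, k ≤ i → u.testBit i = v.testBit i)) := by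
  induction k with
  | zero =>
    intro _ rs0 v hv
    simp only [List.range_zero, List.foldl_nil]
    constructor
    · intro h
      exact ⟨v, h, fun i hi => hi, fun i _ => rfl⟩
    · rintro ⟨u, hu, hsub, hag⟩
      have : u = v := Nat.eq_of_testBit_eq (fun i => hag i (Nat.zero_le i))
      rwa [this] at hu
  | succ k ih =>
    intro hk rs0 v hv
    have hk' : k < 18 := by omega
    rw [List.range_succ, List.foldl_append, List.foldl_cons, List.foldl_nil]
    set z := (List.range k).foldl (fun rs j => rs ||| ((rs &&& pvPatterns.getD j 0) <<< (1 <<< j))) rs0 with hz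
    have hshift : (1 : Nat) <<< k = 2 ^ k := by rw [Nat.shiftLeft_eq, one_mul]
    have hpos : (0:Nat) < 2 ^ k := by positivity
    rw [hshift]
    constructor
    · intro h
      rw [Nat.testBit_or] at h
      rcases Bool.or_eq_true .. |>.mp h with h' | h'
      · obtain ⟨u, hu, hsub, hag⟩ := (ih (by omega) rs0 v hv).mp h'
        exact ⟨u, hu, hsub, fun i hi => hag i (by omega)⟩
      · rw [Nat.testBit_shiftLeft] at h'
        rcases Bool.and_eq_true .. |>.mp h' with ⟨hge, hbit⟩
        have hge' : 2 ^ k ≤ v := of_decide_eq_true hge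
        rw [Nat.testBit_and] at hbit
        rcases Bool.and_eq_true .. |>.mp hbit with ⟨hzbit, hpbit⟩
        rw [pvPatternsGet k hk'] at hpbit
        rcases Bool.and_eq_true .. |>.mp hpbit with ⟨_, hvk'⟩
        have hv'k : (v - 2 ^ k).testBit k = false := by
          cases hvb : (v - 2 ^ k).testBit k
          · rfl
          · rw [hvb] at hvk'; cases hvk'
        obtain ⟨u, hu, hsub, hag⟩ := (ih (by omega) rs0 (v - 2 ^ k) (by omega)).mp hzbit
        have hvbits : ∀ i, v.testBit i = if i = k then true else (v - 2 ^ k).testBit i := by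
          intro i
          have he : v.testBit i = ((v - 2 ^ k) ||| 2 ^ k).testBit i := by
            rw [← pvSetBit k _ hv'k]; congr 1; omega
          rw [he, Nat.testBit_or, Nat.testBit_two_pow]
          by_cases hik : i = k
          · subst hik; simp
          · simp [hik, Ne.symm hik]
        refine ⟨u, hu, ?_, ?_⟩
        · intro i hi
          rw [hvbits i]
          by_cases hik : i = k
          · simp [hik]
          · rw [if_neg hik]; exact hsub i hi
        · intro i hi
          rw [hvbits i, if_neg (by omega)]
          exact hag i (by omega)
    · rintro ⟨u, hu, hsub, hag⟩
      rw [Nat.testBit_or]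
      by_cases hk2 : u.testBit k = v.testBit k
      · have : z.testBit v = true := (ih (by omega) rs0 v hv).mpr ⟨u, hu, hsub, fun i hi => by
          rcases eq_or_lt_of_le hi with rfl | hi'
          · exact hk2
          · exact hag i (by omega)⟩
        rw [this]; rfl
      · have huk : u.testBit k = false := by
          cases hub : u.testBit k
          · rfl
          · rw [hsub k hub] at hk2; rw [hub] at hk2; exact absurd rfl hk2
        have hvk : v.testBit k = true := by
          cases hvb : v.testBit k
          · rw [huk, hvb] at hk2; exact absurd rfl hk2
          · rfl
        have hge : 2 ^ k ≤ v := Nat.ge_two_pow_of_testBit hvk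
        have hv'bits : ∀ i, (v - 2 ^ k).testBit i = if i = k then false else v.testBit i := by
          intro i
          rw [← pvClearBit k v hvk, Nat.testBit_xor, Nat.testBit_two_pow]
          by_cases hik : i = k
          · subst hik; simp [hvk]
          · simp [hik, Ne.symm hik]
        have hzv' : z.testBit (v - 2 ^ k) = true := by
          refine (ih (by omega) rs0 (v - 2 ^ k) (by omega)).mpr ⟨u, hu, ?_, ?_⟩
          · intro i hi
            rw [hv'bits i]
            by_cases hik : i = k
            · subst hik; rw [hi] at huk; cases huk
            · rw [if_neg hik]; exact hsub i hi
          · intro i hi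
            rw [hv'bits i]
            rcases eq_or_lt_of_le hi with rfl | hi'
            · simp [huk]
            · rw [if_neg (by omega)]; exact hag i (by omega)
        have hpat : (pvPatterns.getD k 0).testBit (v - 2 ^ k) = true := by
          rw [pvPatternsGet k hk']
          have h1 : v - 2 ^ k < 262144 := by omega
          have h2 : (v - 2 ^ k).testBit k = false := by rw [hv'bits k]; simp
          simp [h1, h2]
        have hsh : ((z &&& pvPatterns.getD k 0) <<< 2 ^ k).testBit v = true := by
          rw [Nat.testBit_shiftLeft, Nat.testBit_and, hzv', hpat]
          simp [hge]
        rw [hsh]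
        simp
lemma pvZetaBit (row : List Int) (v : Nat) (hv : v < 262144) :
    ((pvZeta (pvRowBits row)).testBit v = true) ↔ ∃ num ∈ row, pvSub (pvMask num) v := by
  unfold pvZeta
  rw [pvZetaAux 18 le_rfl (pvRowBits row) v hv]
  constructor
  · rintro ⟨u, hu, hsub, _⟩
    obtain ⟨num, hnum, rfl⟩ := (pvRowBitsBit row u).mp hu
    exact ⟨num, hnum, hsub⟩
  · rintro ⟨num, hnum, hsub⟩
    refine ⟨pvMask num, (pvRowBitsBit row _).mpr ⟨num, hnum, rfl⟩, hsub, ?_⟩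
    intro i hi
    have h1 : pvMask num < 2 ^ i := by
      have := pvMaskLt num
      have h2 : (262144 : Nat) = 2 ^ 18 := by norm_num
      calc pvMask num < 2 ^ 18 := by omega
        _ ≤ 2 ^ i := Nat.pow_le_pow_right (by omega) hi
    have h2 : v < 2 ^ i := by
      have h3 : (262144 : Nat) = 2 ^ 18 := by norm_num
      calc v < 2 ^ 18 := by omega
        _ ≤ 2 ^ i := Nat.pow_le_pow_right (by omega) hi
    rw [Nat.testBit_lt_two_pow h1, Nat.testBit_lt_two_pow h2]
lemma pvFeasFoldBit (grid : List (List Int)) (acc : Nat) (v : Nat) :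
    (grid.foldl (fun f row => f &&& pvZeta (pvRowBits row)) acc).testBit v
      = (acc.testBit v && grid.all (fun row => (pvZeta (pvRowBits row)).testBit v)) := by
  induction grid generalizing acc with
  | nil => simp
  | cons r rs ih =>
    rw [List.foldl_cons, ih, List.all_cons, Nat.testBit_and, Bool.and_assoc]
lemma pvLowLoopEq (t : Nat) : ∀ (N bit L : Nat), N.testBit L = true →
    (∀ v, N.testBit v = true → L ≤ v) → L < 2 ^ t → pvLowLoop N bit (2 ^ t) = bit + L := by
  induction t with
  | zero =>
    intro N bit L _ _ hL
    rw [pvLowLoop, dif_neg (by norm_num)]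
    omega
  | succ t ih =>
    intro N bit L hbit hmin hL
    have hpow : (2:Nat) ^ (t + 1) = 2 * 2 ^ t := by rw [pow_succ]; ring
    have hpos : (0:Nat) < 2 ^ t := by positivity
    rw [pvLowLoop, dif_pos (by omega)]
    have hspan : 2 ^ (t + 1) / 2 = 2 ^ t := by omega
    simp only [hspan]
    have hones : (1 : Nat) <<< 2 ^ t - 1 = 2 ^ 2 ^ t - 1 := by
      rw [Nat.shiftLeft_eq, one_mul]
    rw [hones]
    by_cases hc : N &&& (2 ^ 2 ^ t - 1) = 0
    · -- no bit below 2^t: L ≥ 2^t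
      have hLge : 2 ^ t ≤ L := by
        have := (pvAndZeroIff N (2 ^ 2 ^ t - 1)).mp hc L hbit
        rw [Nat.testBit_two_pow_sub_one] at this
        simpa using this
      rw [if_pos (by simpa using hc)]
      have hbit' : (N >>> 2 ^ t).testBit (L - 2 ^ t) = true := by
        rw [Nat.testBit_shiftRight]
        have : 2 ^ t + (L - 2 ^ t) = L := by omega
        rw [this]; exact hbit
      have hmin' : ∀ v, (N >>> 2 ^ t).testBit v = true → L - 2 ^ t ≤ v := by
        intro v hv
        rw [Nat.testBit_shiftRight] at hv
        have := hmin (2 ^ t + v) hv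
        omega
      have := ih (N >>> 2 ^ t) (bit + 2 ^ t) (L - 2 ^ t) hbit' hmin' (by omega)
      rw [this]
      omega
    · rw [if_neg (by simpa using hc)]
      have hLlt : L < 2 ^ t := by
        by_contra hge
        apply hc
        rw [pvAndZeroIff]
        intro i hi
        rw [Nat.testBit_two_pow_sub_one]
        have := hmin i hi
        simp only [decide_eq_false_iff_not, not_lt]
        omega
      exact ih N bit L hbit hmin hLlt

lemma pvB_eq (grid : List (List Int)) (hpre : ∀ r ∈ grid, r ≠ []) :
    minimumOR_alt grid = ((pvG 18 (pvMrows grid) : Nat) : Int) := by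
  have h262 : (262144 : Nat) = 2 ^ 18 := by norm_num
  set G := pvG 18 (pvMrows grid) with hG
  have hGlt : G < 262144 := by rw [h262]; exact pvG_lt 18 (pvMrows grid)
  have hne' : ∀ r ∈ pvMrows grid, r ≠ [] := by
    intro r hr
    rw [pvMrows, List.mem_map] at hr
    obtain ⟨row, hrow, rfl⟩ := hr
    simpa using hpre row hrow
  obtain ⟨hFeasG, hMin⟩ := pvGreedy 18 (pvMrows grid) hne'
  have hinit : ((1 : Nat) <<< 262144) - 1 = 2 ^ 262144 - 1 := by
    rw [Nat.shiftLeft_eq, one_mul]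
  have hfeasbit : ∀ v, (grid.foldl (fun f row => f &&& pvZeta (pvRowBits row)) ((1 <<< 262144) - 1)).testBit v
      = (decide (v < 262144) && grid.all (fun row => (pvZeta (pvRowBits row)).testBit v)) := by
    intro v
    rw [pvFeasFoldBit, hinit, Nat.testBit_two_pow_sub_one]
  set N := grid.foldl (fun f row => f &&& pvZeta (pvRowBits row)) ((1 <<< 262144) - 1) with hN
  have hNbit : N.testBit G = true := by
    rw [hfeasbit G]
    rw [decide_eq_true hGlt, Bool.true_and, List.all_eq_true]
    intro row hrow
    apply (pvZetaBit row G hGlt).mpr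
    obtain ⟨m, hm, hsub⟩ := hFeasG (row.map pvMask) (by rw [pvMrows]; exact List.mem_map_of_mem hrow)
    obtain ⟨num, hnum, rfl⟩ := List.mem_map.mp hm
    refine ⟨num, hnum, ?_⟩
    have hmlt : pvMask num < 2 ^ 18 := by rw [← h262]; exact pvMaskLt num
    rwa [Nat.mod_eq_of_lt hmlt] at hsub
  have hNmin : ∀ v, N.testBit v = true → G ≤ v := by
    intro v hv
    by_cases hv18 : v < 262144
    · rw [hfeasbit v] at hv
      rcases Bool.and_eq_true .. |>.mp hv with ⟨_, hall⟩
      rw [List.all_eq_true] at hall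
      apply hMin v (by rw [← h262]; exact hv18)
      intro r hr
      rw [pvMrows, List.mem_map] at hr
      obtain ⟨row, hrow, rfl⟩ := hr
      obtain ⟨num, hnum, hsub⟩ := (pvZetaBit row v hv18).mp (hall row hrow)
      refine ⟨pvMask num, List.mem_map_of_mem hnum, ?_⟩
      have hmlt : pvMask num < 2 ^ 18 := by rw [← h262]; exact pvMaskLt num
      rwa [Nat.mod_eq_of_lt hmlt]
    · omega
  have hNne : (N == 0) = false := by
    have : 2 ^ G ≤ N := Nat.ge_two_pow_of_testBit hNbit
    have hp : (0:Nat) < 2 ^ G := by positivity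
    simp only [beq_eq_false_iff_ne, ne_eq]
    omega
  simp only [minimumOR_alt]
  rw [← hN, hNne]
  simp only [Bool.false_eq_true, if_false]
  rw [show (262144 : Nat) = 2 ^ 18 from by norm_num,
    pvLowLoopEq 18 N 0 G hNbit hNmin (by omega)]
  simp

-- ===== VERDICT (by name: the statement is the Claim_ definition above) =====
theorem minimumOR_spec : Claim_equal_minimumOR := by
  intro grid _ hpre
  show minimumOR grid = minimumOR_alt grid
  rw [pvA_eq, pvB_eq grid hpre]
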